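-- pv_equiv track=rewrite | github.com/cmorgan-NN/PanelMate_page_gen | PanelMate_page_gen-VS_Indicator-preproc.py | removePageBreaks
-- ===== SOURCE A (Python) =====
-- def removePageBreaks(preprocessedVS_IndicatorFileLines_Raw):
--     #find page breaks
--     lineNumber = 0
--     pageBreakLines = []
--     for line in preprocessedVS_IndicatorFileLines_Raw:
--         lineNumber += 1
--         if "Page" and "Configuration" in line: #the page line contains Page and Configuration
--             pageBreakLines.append(lineNumber - 1) #the line before a page line is unwanted
--             pageBreakLines.append(lineNumber)
--             pageBreakLines.append(lineNumber + 1) #and the line after a page line is unwanted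
--
--     #create a new list of data without page breaks
--     lineNumber = 0
--     preprocessedVS_IndicatorFileLines = []
--     for line in preprocessedVS_IndicatorFileLines_Raw:
--         lineNumber += 1
--         if lineNumber not in pageBreakLines:
--             preprocessedVS_IndicatorFileLines.append(line)
--
--     #passback data
--     return preprocessedVS_IndicatorFileLines
-- ===== SOURCE B (Python) =====
-- def removePageBreaks(preprocessedVS_IndicatorFileLines_Raw):
--     # Note: A's test '"Page" and "Configuration" in line' is just '"Configuration" in line'.
--     marks = ["Configuration" in line for line in preprocessedVS_IndicatorFileLines_Raw]
--     n = len(marks)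
--     return [line for i, line in enumerate(preprocessedVS_IndicatorFileLines_Raw)
--             if not ((i > 0 and marks[i - 1]) or marks[i] or (i + 1 < n and marks[i + 1]))]
-- ===== Notes on version B (the rewrite author's own statement) =====
-- stated objective: alternative
-- what changed: Instead of collecting every marker's three line numbers into a list and testing each line number against that list, B computes a boolean marker mask once and keeps a line iff none of positions i-1, i, i+1 is a marker (a neighborhood/dilation test on the filtering side).
import Mathlib
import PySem

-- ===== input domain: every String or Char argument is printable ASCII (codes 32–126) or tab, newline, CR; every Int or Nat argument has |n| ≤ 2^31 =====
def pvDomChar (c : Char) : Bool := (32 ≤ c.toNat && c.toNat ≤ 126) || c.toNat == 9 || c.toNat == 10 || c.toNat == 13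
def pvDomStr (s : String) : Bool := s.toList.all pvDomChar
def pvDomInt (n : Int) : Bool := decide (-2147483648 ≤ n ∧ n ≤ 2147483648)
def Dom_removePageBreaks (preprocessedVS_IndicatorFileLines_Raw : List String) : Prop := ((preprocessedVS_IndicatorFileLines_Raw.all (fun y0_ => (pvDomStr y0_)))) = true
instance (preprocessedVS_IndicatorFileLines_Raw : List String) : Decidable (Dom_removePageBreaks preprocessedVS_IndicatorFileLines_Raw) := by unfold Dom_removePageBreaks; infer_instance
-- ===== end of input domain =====

-- ===== PORT A =====
-- B replaces the collected page-break line-number list and its per-line scan by a marker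
-- mask with a ±1 neighborhood test; equivalence of return values is proved on Dom.
-- (A's test '"Page" and "Configuration" in line' evaluates to '"Configuration" in line'.)
def removePageBreaks (preprocessedVS_IndicatorFileLines_Raw : List String) : List String :=
  -- find page breaks
  let pageBreakLines : List Int :=
    (preprocessedVS_IndicatorFileLines_Raw.foldl
      (fun (st : Int × List Int) line =>
        let lineNumber := st.1 + 1
        if PySem.Str.isIn "Configuration" line then
          (lineNumber, st.2 ++ [lineNumber - 1, lineNumber, lineNumber + 1])
        else (lineNumber, st.2))
      (0, [])).2
  -- create a new list of data without page breaks
  (preprocessedVS_IndicatorFileLines_Raw.foldl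
    (fun (st : Int × List String) line =>
      let lineNumber := st.1 + 1
      if lineNumber ∉ pageBreakLines then (lineNumber, st.2 ++ [line])
      else (lineNumber, st.2))
    (0, [])).2

-- ===== PORT B =====
def removePageBreaks_alt (preprocessedVS_IndicatorFileLines_Raw : List String) : List String :=
  let marks : List Bool :=
    preprocessedVS_IndicatorFileLines_Raw.map (fun line => PySem.Str.isIn "Configuration" line)
  let n : Int := (marks.length : Int)
  ((PySem.List.enumerate preprocessedVS_IndicatorFileLines_Raw 0).filter
    (fun p =>
      !((decide (0 < p.1) && PySem.List.pyGetD marks (p.1 - 1) false) ||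
        PySem.List.pyGetD marks p.1 false ||
        (decide (p.1 + 1 < n) && PySem.List.pyGetD marks (p.1 + 1) false)))).map Prod.snd

-- ===== PRECONDITION & SPEC =====

def Spec_removePageBreaks (preprocessedVS_IndicatorFileLines_Raw : List String) (out : List String) : Prop := out = removePageBreaks_alt preprocessedVS_IndicatorFileLines_Raw
instance (preprocessedVS_IndicatorFileLines_Raw : List String) (out : List String) : Decidable (Spec_removePageBreaks preprocessedVS_IndicatorFileLines_Raw out) := by unfold Spec_removePageBreaks; infer_instance

-- ===== CLAIM (what is proved, stated in full; the proofs are below) =====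
def Claim_equal_removePageBreaks : Prop := ∀ (preprocessedVS_IndicatorFileLines_Raw : List String), Dom_removePageBreaks preprocessedVS_IndicatorFileLines_Raw → Spec_removePageBreaks preprocessedVS_IndicatorFileLines_Raw (removePageBreaks preprocessedVS_IndicatorFileLines_Raw)

-- ===== LEMMAS AND PROOFS =====

def pvC (line : String) : Bool := PySem.Str.isIn "Configuration" line

def pvPB (xs : List String) : List Int :=
  (xs.foldl
    (fun (st : Int × List Int) line =>
      let lineNumber := st.1 + 1
      if PySem.Str.isIn "Configuration" line then
        (lineNumber, st.2 ++ [lineNumber - 1, lineNumber, lineNumber + 1])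
      else (lineNumber, st.2))
    (0, [])).2

lemma pv_pb_mem (xs : List String) (s : Int) (acc : List Int) (j : Int) :
    (j ∈ (xs.foldl
      (fun (st : Int × List Int) line =>
        let lineNumber := st.1 + 1
        if PySem.Str.isIn "Configuration" line then
          (lineNumber, st.2 ++ [lineNumber - 1, lineNumber, lineNumber + 1])
        else (lineNumber, st.2))
      (s, acc)).2) ↔
    j ∈ acc ∨ ∃ p ∈ PySem.List.enumerate xs s,
      pvC p.2 = true ∧ (j = p.1 ∨ j = p.1 + 1 ∨ j = p.1 + 2) := by
  induction xs generalizing s acc with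
  | nil => simp [PySem.List.enumerate_nil]
  | cons x t ih =>
    simp only [List.foldl_cons]
    by_cases hx : PySem.Str.isIn "Configuration" x
    · simp only [hx, if_pos]
      rw [ih]
      simp only [PySem.List.enumerate_cons, List.mem_cons, List.mem_append, pvC]
      constructor
      · rintro ((h | h) | ⟨p, hp, hc, hj⟩)
        · exact Or.inl h
        · refine Or.inr ⟨(s, x), Or.inl rfl, hx, ?_⟩
          simp only [List.not_mem_nil, or_false] at h
          omega
        · exact Or.inr ⟨p, Or.inr hp, hc, hj⟩
      · rintro (h | ⟨p, (rfl | hp), hc, hj⟩)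
        · exact Or.inl (Or.inl h)
        · refine Or.inl (Or.inr ?_)
          simp only [List.not_mem_nil, or_false]
          omega
        · exact Or.inr ⟨p, hp, hc, hj⟩
    · simp only [hx, if_neg, Bool.false_eq_true, not_false_iff]
      rw [ih]
      simp only [PySem.List.enumerate_cons, List.mem_cons]
      constructor
      · rintro (h | ⟨p, hp, hc, hj⟩)
        · exact Or.inl h
        · exact Or.inr ⟨p, Or.inr hp, hc, hj⟩
      · rintro (h | ⟨p, (rfl | hp), hc, hj⟩)
        · exact Or.inl h
        · exact absurd hc (by simpa [pvC] using hx)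
        · exact Or.inr ⟨p, hp, hc, hj⟩

lemma pv_keep_eq (pb : List Int) (xs : List String) (s : Int) (acc : List String) :
    (xs.foldl
      (fun (st : Int × List String) line =>
        let lineNumber := st.1 + 1
        if lineNumber ∉ pb then (lineNumber, st.2 ++ [line]) else (lineNumber, st.2))
      (s, acc)).2
    = acc ++ ((PySem.List.enumerate xs s).filter
        (fun p => decide ((p.1 + 1) ∉ pb))).map Prod.snd := by
  induction xs generalizing s acc with
  | nil => simp [PySem.List.enumerate_nil]
  | cons x t ih =>
    rw [List.foldl_cons, PySem.List.enumerate_cons, List.filter_cons]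
    by_cases h : (s + 1) ∈ pb
    · have hinit : (let lineNumber := ((s, acc) : Int × List String).1 + 1;
          if lineNumber ∉ pb then (lineNumber, (s, acc).2 ++ [x]) else (lineNumber, (s, acc).2))
          = ((s + 1 : Int), acc) := by simp [h]
      rw [hinit, ih]
      simp [h]
    · have hinit : (let lineNumber := ((s, acc) : Int × List String).1 + 1;
          if lineNumber ∉ pb then (lineNumber, (s, acc).2 ++ [x]) else (lineNumber, (s, acc).2))
          = ((s + 1 : Int), acc ++ [x]) := by simp [h]
      rw [hinit, ih]
      simp [h]

lemma pv_mapc_getD (xs : List String) (k : Nat) :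
    (xs.map pvC).getD k false = if h : k < xs.length then pvC xs[k] else false := by
  split
  · next h =>
    rw [List.getD_eq_getElem _ _ (by simpa using h)]
    simp
  · next h =>
    rw [List.getD_eq_default _ _ (by simpa using h)]

lemma pv_pred_eq (xs : List String) (k : Nat) (hk : k < xs.length) :
    (decide ((((0:Int) + ↑k) + 1) ∉ pvPB xs)) =
    !((decide (0 < ((0:Int) + ↑k)) &&
        PySem.List.pyGetD (xs.map (fun line => PySem.Str.isIn "Configuration" line)) (((0:Int) + ↑k) - 1) false) ||
      PySem.List.pyGetD (xs.map (fun line => PySem.Str.isIn "Configuration" line)) ((0:Int) + ↑k) false ||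
      (decide (((0:Int) + ↑k) + 1 < ((xs.map (fun line => PySem.Str.isIn "Configuration" line)).length : Int)) &&
        PySem.List.pyGetD (xs.map (fun line => PySem.Str.isIn "Configuration" line)) (((0:Int) + ↑k) + 1) false)) := by
  have hmap : (fun line => PySem.Str.isIn "Configuration" line) = pvC := rfl
  rw [hmap, Bool.eq_iff_iff]
  simp only [zero_add, decide_eq_true_iff, Bool.not_eq_true', Bool.or_eq_false_iff,
    Bool.and_eq_false_iff, decide_eq_false_iff_not, not_lt, List.length_map]
  unfold pvPB
  rw [pv_pb_mem]
  simp only [List.not_mem_nil, false_or, PySem.List.mem_enumerate_iff, zero_add]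
  constructor
  · intro hnot
    refine ⟨⟨?_, ?_⟩, ?_⟩
    · by_cases h0 : 0 < (k:Int)
      · right
        rw [show ((k:Int) - 1) = ((k-1 : Nat) : Int) from by omega,
          PySem.List.pyGetD_natCast, pv_mapc_getD, dif_pos (show k - 1 < xs.length by omega)]
        by_contra hc
        exact hnot ⟨(↑(k-1), xs[k-1]), ⟨k-1, by omega, by simp⟩,
          by simpa using hc, by right; right; omega⟩
      · exact Or.inl (by omega)
    · rw [show ((k:Int)) = ((k:Nat):Int) from rfl, PySem.List.pyGetD_natCast, pv_mapc_getD,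
        dif_pos hk]
      by_contra hc
      exact hnot ⟨(↑k, xs[k]), ⟨k, hk, by simp⟩, by simpa using hc, by right; left; omega⟩
    · by_cases h1 : (k:Int) + 1 < (xs.length : Int)
      · right
        rw [show ((k:Int) + 1) = ((k+1 : Nat) : Int) from by omega,
          PySem.List.pyGetD_natCast, pv_mapc_getD, dif_pos (show k + 1 < xs.length by omega)]
        by_contra hc
        exact hnot ⟨(↑(k+1), xs[k+1]), ⟨k+1, by omega, by simp⟩,
          by simpa using hc, by left; omega⟩
      · exact Or.inl (by omega)
  · rintro ⟨⟨hprev, hself⟩, hnext⟩ ⟨p, ⟨m, hm, rfl⟩, hc, hj⟩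
    
    have hg : ∀ (i : Nat), i < xs.length →
        PySem.List.pyGetD (xs.map pvC) ((i : Nat) : Int) false = pvC (xs.getD i "") := by
      intro i hi
      rw [PySem.List.pyGetD_natCast, pv_mapc_getD, dif_pos hi, List.getD_eq_getElem _ _ hi]
    rcases hj with hj | hj | hj
    · -- ↑k + 1 = ↑m : the next line is a marker
      rcases hnext with h | h
      · omega
      · rw [show ((k:Int) + 1) = ((m : Nat) : Int) from by omega, hg m hm] at h
        simp [List.getElem?_eq_getElem hm, hc] at h
    · -- ↑k + 1 = ↑m + 1 : this line is a marker
      rw [show ((k:Int)) = ((m : Nat) : Int) from by omega, hg m hm] at hself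
      simp [List.getElem?_eq_getElem hm, hc] at hself
    · -- ↑k + 1 = ↑m + 2 : the previous line is a marker
      rcases hprev with h | h
      · omega
      · rw [show ((k:Int) - 1) = ((m : Nat) : Int) from by omega, hg m hm] at h
        simp [List.getElem?_eq_getElem hm, hc] at h

-- ===== VERDICT (by name: the statement is the Claim_ definition above) =====
theorem removePageBreaks_spec : Claim_equal_removePageBreaks := by
  intro xs _
  unfold Spec_removePageBreaks
  show removePageBreaks xs = removePageBreaks_alt xs
  have hA : removePageBreaks xs
      = ((PySem.List.enumerate xs 0).filter
          (fun p => decide ((p.1 + 1) ∉ pvPB xs))).map Prod.snd := by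
    show (xs.foldl
        (fun (st : Int × List String) line =>
          let lineNumber := st.1 + 1
          if lineNumber ∉ pvPB xs then (lineNumber, st.2 ++ [line]) else (lineNumber, st.2))
        (0, [])).2 = _
    rw [pv_keep_eq (pvPB xs) xs 0 []]
    simp
  have hB : removePageBreaks_alt xs
      = ((PySem.List.enumerate xs 0).filter
          (fun p =>
            !((decide (0 < p.1) &&
                PySem.List.pyGetD (xs.map (fun line => PySem.Str.isIn "Configuration" line)) (p.1 - 1) false) ||
              PySem.List.pyGetD (xs.map (fun line => PySem.Str.isIn "Configuration" line)) p.1 false ||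
              (decide (p.1 + 1 < ((xs.map (fun line => PySem.Str.isIn "Configuration" line)).length : Int)) &&
                PySem.List.pyGetD (xs.map (fun line => PySem.Str.isIn "Configuration" line)) (p.1 + 1) false)))).map
          Prod.snd := rfl
  rw [hA, hB]
  refine congrArg (List.map Prod.snd) (List.filter_congr ?_)
  intro p hp
  rcases (PySem.List.mem_enumerate_iff xs 0 p).1 hp with ⟨k, hk, rfl⟩
  exact pv_pred_eq xs k hk
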